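-- pv_equiv track=rewrite | github.com/psp515/IntroductionToComputerScience | Addons/20.21/Programs/task5.py | trojki_count
-- ===== SOURCE A (Python) =====
-- def NWD(a, b):
--     while b != 0:
--         a, b = b, a % b
--     return a
--
-- def NWD3(a,b,c):
--     return NWD(a, b) == 1 and NWD(b, c) == 1 and NWD(a, c) == 1
--
-- def trojki_count(arr, i=0, numbers=[], skip=False):
--     if len(numbers) == 3: # jezeli mamy 3 liczby to sprawdzamy warunki
--         if NWD3(numbers[0],numbers[1],numbers[2]) == 1: # sprawdzamy warunki
--             return 1
--         return 0
--
--     if i == len(arr): # jezeli wyszlismy poza tablice to koniec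
--         return 0
--
--     if skip == True: # jezeli pominelisy ostatni wyraz to musimy brac aktualny
--         return trojki_count(arr, i+1, numbers + [arr[i]], False)
--
--     # standardowe zakonczenie albo bierzemy element albo nie
--     return trojki_count(arr, i+1, numbers, True) + trojki_count(arr, i+1, numbers + [arr[i]], False)
-- ===== SOURCE B (Python) =====
-- def NWD(a, b):
--     while b != 0:
--         a, b = b, a % b
--     return a
--
-- def NWD3(a, b, c):
--     return NWD(a, b) == 1 and NWD(b, c) == 1 and NWD(a, c) == 1
--
-- def _chk(a, b, c):
--     return 1 if NWD3(a, b, c) else 0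
--
-- def trojki_count(arr, i=0, numbers=[], skip=False):
--     # Closed-form enumeration: a skip must be followed by a take, so the
--     # chosen offsets (relative to i) of the remaining takes start at 0
--     # (or 1 if a skip is still allowed) and grow by 1 or 2; counting is a
--     # bounded sum instead of a recursion.
--     k = len(numbers)
--     if k == 3:
--         return _chk(numbers[0], numbers[1], numbers[2])
--     if k > 3:
--         return 0
--     n = len(arr)
--     first_opts = (0,) if skip else (0, 1)
--     total = 0
--     if k == 2:
--         for t1 in first_opts:
--             if i + t1 < n:
--                 total += _chk(numbers[0], numbers[1], arr[i + t1])
--     elif k == 1: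
--         for t1 in first_opts:
--             for d in (1, 2):
--                 if i + t1 + d < n:
--                     total += _chk(numbers[0], arr[i + t1], arr[i + t1 + d])
--     else:  # k == 0
--         for t1 in first_opts:
--             for d1 in (1, 2):
--                 for d2 in (1, 2):
--                     if i + t1 + d1 + d2 < n:
--                         total += _chk(arr[i + t1], arr[i + t1 + d1], arr[i + t1 + d1 + d2])
--     return total
-- ===== Notes on version B (the rewrite author's own statement) =====
-- stated objective: alternative
-- what changed: B replaces A's binary take/skip recursion by a closed-form enumeration of the bounded set of admissible take-offset tuples (consecutive chosen offsets differ by 1 or 2, first offset 0 or 1 depending on skip), summing the coprimality indicator directly.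
import Mathlib
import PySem

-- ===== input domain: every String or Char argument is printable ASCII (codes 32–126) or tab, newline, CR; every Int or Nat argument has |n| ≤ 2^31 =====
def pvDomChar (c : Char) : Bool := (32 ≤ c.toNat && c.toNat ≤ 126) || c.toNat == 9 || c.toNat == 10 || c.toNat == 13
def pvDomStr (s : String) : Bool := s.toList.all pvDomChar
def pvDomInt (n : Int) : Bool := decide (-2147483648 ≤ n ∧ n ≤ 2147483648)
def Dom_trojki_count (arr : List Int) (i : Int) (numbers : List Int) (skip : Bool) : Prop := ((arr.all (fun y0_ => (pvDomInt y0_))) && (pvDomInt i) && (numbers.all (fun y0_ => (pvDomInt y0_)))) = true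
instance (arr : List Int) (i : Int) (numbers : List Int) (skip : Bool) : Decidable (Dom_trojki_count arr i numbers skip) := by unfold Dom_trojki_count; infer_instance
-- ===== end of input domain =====

-- B replaces A's branching recursion by a direct closed-form enumeration of the
-- bounded set of admissible take-offset tuples (objective: alternative, same cost).

-- ===== PORT A =====

-- lemma cited by trojki_count's decreasing_by
theorem pv_dec {n : Nat} {i : Int} (h : PySem.Raise.InRange n i) :
    ((n : Int) - (i + 1)).toNat < ((n : Int) - i).toNat := by
  simp [PySem.Raise.InRange] at h; omega

-- lemma cited by NWD's decreasing_by
theorem pv_mod_natAbs_lt (a b : Int) (hb : ¬ b = 0) :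
    (PySem.Int.mod a b).natAbs < b.natAbs := by
  rcases lt_or_gt_of_ne hb with h | h
  · have := PySem.Int.mod_neg_bounds (a := a) h
    omega
  · have h1 := PySem.Int.mod_nonneg (a := a) h
    have h2 := PySem.Int.mod_lt (a := a) h
    omega

-- while b != 0: a, b = b, a % b   (Python '%' = PySem.Int.mod)
def NWD (a b : Int) : Int :=
  if h : b = 0 then a
  else NWD b (PySem.Int.mod a b)
termination_by b.natAbs
decreasing_by exact pv_mod_natAbs_lt a b h

def NWD3 (a b c : Int) : Bool :=
  NWD a b == 1 && NWD b c == 1 && NWD a c == 1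

-- literal transliteration of A; arr[i] is pyGetD under the InRange guard
-- (the guard only totalizes the IndexError case, which Pre_ excludes)
def trojki_count (arr : List Int) (i : Int) (numbers : List Int) (skip : Bool) : Int :=
  if numbers.length = 3 then
    match numbers with
    | a :: b :: c :: _ => if NWD3 a b c then 1 else 0
    | _ => 0 -- unreachable: length = 3
  else if i = (arr.length : Int) then 0
  else if h : PySem.Raise.InRange arr.length i then
    if skip then trojki_count arr (i + 1) (numbers ++ [PySem.List.pyGetD arr i 0]) false
    else trojki_count arr (i + 1) numbers true
         + trojki_count arr (i + 1) (numbers ++ [PySem.List.pyGetD arr i 0]) false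
  else 0 -- Python raises IndexError here; Pre_ excludes these inputs
termination_by ((arr.length : Int) - i).toNat
decreasing_by
  all_goals exact pv_dec h

-- ===== PORT B =====

-- Source B's helper _chk: the 0/1 coprimality indicator
def chk (a b c : Int) : Int := if NWD3 a b c then 1 else 0

-- transliteration of Source B; arr[j] is pyGetD arr j 0, only read when j is in range
def trojki_count_alt (arr : List Int) (i : Int) (numbers : List Int) (skip : Bool) : Int :=
  let g : Int → Int := fun j => PySem.List.pyGetD arr j 0
  let n : Int := arr.length
  if numbers.length = 3 then
    chk (PySem.List.pyGetD numbers 0 0) (PySem.List.pyGetD numbers 1 0)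
        (PySem.List.pyGetD numbers 2 0)
  else if numbers.length > 3 then 0
  else
    let firstOpts : List Int := if skip then [0] else [0, 1]
    if numbers.length = 2 then
      firstOpts.foldl (fun total t1 =>
        if i + t1 < n then
          total + chk (PySem.List.pyGetD numbers 0 0) (PySem.List.pyGetD numbers 1 0) (g (i + t1))
        else total) 0
    else if numbers.length = 1 then
      firstOpts.foldl (fun total t1 =>
        ([1, 2] : List Int).foldl (fun total d =>
          if i + t1 + d < n then
            total + chk (PySem.List.pyGetD numbers 0 0) (g (i + t1)) (g (i + t1 + d))
          else total) total) 0
    else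
      firstOpts.foldl (fun total t1 =>
        ([1, 2] : List Int).foldl (fun total d1 =>
          ([1, 2] : List Int).foldl (fun total d2 =>
            if i + t1 + d1 + d2 < n then
              total + chk (g (i + t1)) (g (i + t1 + d1)) (g (i + t1 + d1 + d2))
            else total) total) total) 0

-- ===== PRECONDITION & SPEC =====
-- Pre_ excludes exactly the inputs on which A raises IndexError: with fewer or more
-- than 3 collected numbers, an index i outside [-len(arr), len(arr)] forces an
-- out-of-range arr[i] access.
def Pre_trojki_count (arr : List Int) (i : Int) (numbers : List Int) (skip : Bool) : Prop :=
  numbers.length = 3 ∨ (-(arr.length : Int) ≤ i ∧ i ≤ (arr.length : Int))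
instance (arr : List Int) (i : Int) (numbers : List Int) (skip : Bool) : Decidable (Pre_trojki_count arr i numbers skip) := by unfold Pre_trojki_count; infer_instance

def pvWitness_trojki_count : List Int × Int × List Int × Bool := ([2, 3, 5], 0, [], false)

def Spec_trojki_count (arr : List Int) (i : Int) (numbers : List Int) (skip : Bool) (out : Int) : Prop := out = trojki_count_alt arr i numbers skip
instance (arr : List Int) (i : Int) (numbers : List Int) (skip : Bool) (out : Int) : Decidable (Spec_trojki_count arr i numbers skip out) := by unfold Spec_trojki_count; infer_instance

-- ===== CLAIM (what is proved, stated in full; the proofs are below) =====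
def Claim_equal_trojki_count : Prop := ∀ (arr : List Int) (i : Int) (numbers : List Int) (skip : Bool), Dom_trojki_count arr i numbers skip → Pre_trojki_count arr i numbers skip → Spec_trojki_count arr i numbers skip (trojki_count arr i numbers skip)

-- ===== LEMMAS AND PROOFS =====

-- proof-only abbreviation: the totalized element access
def pvG (arr : List Int) (j : Int) : Int := PySem.List.pyGetD arr j 0

theorem pvG_fold (arr : List Int) (j : Int) : PySem.List.pyGetD arr j 0 = pvG arr j := rfl

theorem pvIdx0 (x : Int) (l : List Int) : PySem.List.pyGetD (x :: l) 0 0 = x := by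
  simp [PySem.List.pyGetD, PySem.List.pyGet?, PySem.List.pyIdx?]
theorem pvIdx1 (x y : Int) (l : List Int) : PySem.List.pyGetD (x :: y :: l) 1 0 = y := by
  simp [PySem.List.pyGetD, PySem.List.pyGet?, PySem.List.pyIdx?]
theorem pvIdx2 (x y z : Int) (l : List Int) : PySem.List.pyGetD (x :: y :: z :: l) 2 0 = z := by
  simp [PySem.List.pyGetD, PySem.List.pyGet?, PySem.List.pyIdx?]
  rw [if_pos (by omega : (2 : Int) ≤ (l.length : Int) + 1 + 1)]
  simp

-- index-offset normalizers (keep both sides in the shape i + k)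
theorem pvn11 (x : Int) : x + 1 + 1 = x + 2 := by ring
theorem pvn12 (x : Int) : x + 1 + 2 = x + 3 := by ring
theorem pvn21 (x : Int) : x + 2 + 1 = x + 3 := by ring
theorem pvn22 (x : Int) : x + 2 + 2 = x + 4 := by ring
theorem pvn31 (x : Int) : x + 3 + 1 = x + 4 := by ring
theorem pvn32 (x : Int) : x + 3 + 2 = x + 5 := by ring
theorem pvn41 (x : Int) : x + 4 + 1 = x + 5 := by ring
theorem pvn13 (x : Int) : x + 1 + 3 = x + 4 := by ring
theorem pvn14 (x : Int) : x + 1 + 4 = x + 5 := by ring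
theorem pvn23 (x : Int) : x + 2 + 3 = x + 5 := by ring

-- pulls the fold step's conditional increment out of the accumulator
theorem pv_pull (c : Prop) [Decidable c] (x a : Int) :
    (if c then x + a else x) = x + (if c then a else 0) := by
  split_ifs <;> ring

theorem pv_inrange {arr : List Int} {i : Int}
    (h1 : -(arr.length : Int) ≤ i) (h2 : i < (arr.length : Int)) :
    PySem.Raise.InRange arr.length i := by
  simp [PySem.Raise.InRange]; omega

theorem pv_A3 (arr : List Int) (i : Int) (a b c : Int) (skip : Bool) :
    trojki_count arr i [a, b, c] skip = chk a b c := by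
  rw [trojki_count.eq_def, if_pos (by simp)]; rfl

theorem pv_Abig (arr : List Int) :
    ∀ (k : Nat) (i : Int) (numbers : List Int) (skip : Bool),
      4 ≤ numbers.length → -(arr.length : Int) ≤ i → i ≤ (arr.length : Int) →
      ((arr.length : Int) - i).toNat = k → trojki_count arr i numbers skip = 0 := by
  intro k
  induction k with
  | zero =>
    intro i numbers skip h4 h1 h2 hk
    have hi : i = (arr.length : Int) := by omega
    rw [trojki_count.eq_def, if_neg (by omega), if_pos hi]
  | succ m ih =>
    intro i numbers skip h4 h1 h2 hk
    have hin : i < (arr.length : Int) := by omega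
    rw [trojki_count.eq_def, if_neg (by omega), if_neg (by omega),
        dif_pos (pv_inrange h1 hin)]
    have e1 : trojki_count arr (i + 1) (numbers ++ [PySem.List.pyGetD arr i 0]) false = 0 :=
      ih (i + 1) _ false (by simp; omega) (by omega) (by omega) (by omega)
    have e2 : trojki_count arr (i + 1) numbers true = 0 :=
      ih (i + 1) _ true h4 (by omega) (by omega) (by omega)
    cases skip <;> simp [e1, e2]

theorem pv_A2t (arr : List Int) (i : Int) (a b : Int)
    (h1 : -(arr.length : Int) ≤ i) (h2 : i ≤ (arr.length : Int)) :
    trojki_count arr i [a, b] true =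
      if i < (arr.length : Int) then chk a b (pvG arr i) else 0 := by
  by_cases hin : i < (arr.length : Int)
  · rw [trojki_count.eq_def, if_neg (by simp), if_neg (by omega),
        dif_pos (pv_inrange h1 hin), if_pos rfl]
    simp only [List.cons_append, List.nil_append, pvG_fold]
    rw [pv_A3, if_pos hin]
  · have hi : i = (arr.length : Int) := by omega
    rw [trojki_count.eq_def, if_neg (by simp), if_pos hi, if_neg hin]

theorem pv_A2f (arr : List Int) (i : Int) (a b : Int)
    (h1 : -(arr.length : Int) ≤ i) (h2 : i ≤ (arr.length : Int)) :
    trojki_count arr i [a, b] false =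
      (if i < (arr.length : Int) then chk a b (pvG arr i) else 0)
      + (if i + 1 < (arr.length : Int) then chk a b (pvG arr (i + 1)) else 0) := by
  by_cases hin : i < (arr.length : Int)
  · rw [trojki_count.eq_def, if_neg (by simp), if_neg (by omega),
        dif_pos (pv_inrange h1 hin), if_neg (by simp)]
    simp only [List.cons_append, List.nil_append, pvG_fold]
    rw [pv_A3, pv_A2t arr (i + 1) a b (by omega) (by omega)]
    split_ifs <;> first | (exfalso; omega) | ring1
  · have hi : i = (arr.length : Int) := by omega
    rw [trojki_count.eq_def, if_neg (by simp), if_pos hi]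
    split_ifs <;> first | (exfalso; omega) | ring1

theorem pv_A1t (arr : List Int) (i : Int) (a : Int)
    (h1 : -(arr.length : Int) ≤ i) (h2 : i ≤ (arr.length : Int)) :
    trojki_count arr i [a] true =
      (if i + 1 < (arr.length : Int) then chk a (pvG arr i) (pvG arr (i + 1)) else 0)
      + (if i + 2 < (arr.length : Int) then chk a (pvG arr i) (pvG arr (i + 2)) else 0) := by
  by_cases hin : i < (arr.length : Int)
  · rw [trojki_count.eq_def, if_neg (by simp), if_neg (by omega),
        dif_pos (pv_inrange h1 hin), if_pos rfl]
    simp only [List.cons_append, List.nil_append, pvG_fold]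
    rw [pv_A2f arr (i + 1) a (pvG arr i) (by omega) (by omega)]
    simp only [pvn11, pvn12, pvn13, pvn14, pvn21, pvn22, pvn23, pvn31, pvn32, pvn41]
  · have hi : i = (arr.length : Int) := by omega
    rw [trojki_count.eq_def, if_neg (by simp), if_pos hi]
    split_ifs <;> first | (exfalso; omega) | ring1

theorem pv_A1f (arr : List Int) (i : Int) (a : Int)
    (h1 : -(arr.length : Int) ≤ i) (h2 : i ≤ (arr.length : Int)) :
    trojki_count arr i [a] false =
      (if i + 1 < (arr.length : Int) then chk a (pvG arr i) (pvG arr (i + 1)) else 0)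
      + (if i + 2 < (arr.length : Int) then chk a (pvG arr i) (pvG arr (i + 2)) else 0)
      + (if i + 2 < (arr.length : Int) then chk a (pvG arr (i + 1)) (pvG arr (i + 2)) else 0)
      + (if i + 3 < (arr.length : Int) then chk a (pvG arr (i + 1)) (pvG arr (i + 3)) else 0) := by
  by_cases hin : i < (arr.length : Int)
  · rw [trojki_count.eq_def, if_neg (by simp), if_neg (by omega),
        dif_pos (pv_inrange h1 hin), if_neg (by simp)]
    simp only [List.cons_append, List.nil_append, pvG_fold]
    rw [pv_A1t arr (i + 1) a (by omega) (by omega),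
        pv_A2f arr (i + 1) a (pvG arr i) (by omega) (by omega)]
    simp only [pvn11, pvn12, pvn13, pvn14, pvn21, pvn22, pvn23, pvn31, pvn32, pvn41]
    first | ring1 | (split_ifs <;> first | (exfalso; omega) | ring1)
  · have hi : i = (arr.length : Int) := by omega
    rw [trojki_count.eq_def, if_neg (by simp), if_pos hi]
    split_ifs <;> first | (exfalso; omega) | ring1

theorem pv_A0t (arr : List Int) (i : Int)
    (h1 : -(arr.length : Int) ≤ i) (h2 : i ≤ (arr.length : Int)) :
    trojki_count arr i [] true =
      (if i + 2 < (arr.length : Int) then chk (pvG arr i) (pvG arr (i + 1)) (pvG arr (i + 2)) else 0)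
      + (if i + 3 < (arr.length : Int) then chk (pvG arr i) (pvG arr (i + 1)) (pvG arr (i + 3)) else 0)
      + (if i + 3 < (arr.length : Int) then chk (pvG arr i) (pvG arr (i + 2)) (pvG arr (i + 3)) else 0)
      + (if i + 4 < (arr.length : Int) then chk (pvG arr i) (pvG arr (i + 2)) (pvG arr (i + 4)) else 0) := by
  by_cases hin : i < (arr.length : Int)
  · rw [trojki_count.eq_def, if_neg (by simp), if_neg (by omega),
        dif_pos (pv_inrange h1 hin), if_pos rfl]
    simp only [List.nil_append, pvG_fold]
    rw [pv_A1f arr (i + 1) (pvG arr i) (by omega) (by omega)]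
    simp only [pvn11, pvn12, pvn13, pvn14, pvn21, pvn22, pvn23, pvn31, pvn32, pvn41]
  · have hi : i = (arr.length : Int) := by omega
    rw [trojki_count.eq_def, if_neg (by simp), if_pos hi]
    split_ifs <;> first | (exfalso; omega) | ring1

theorem pv_A0f (arr : List Int) (i : Int)
    (h1 : -(arr.length : Int) ≤ i) (h2 : i ≤ (arr.length : Int)) :
    trojki_count arr i [] false =
      (if i + 2 < (arr.length : Int) then chk (pvG arr i) (pvG arr (i + 1)) (pvG arr (i + 2)) else 0)
      + (if i + 3 < (arr.length : Int) then chk (pvG arr i) (pvG arr (i + 1)) (pvG arr (i + 3)) else 0)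
      + (if i + 3 < (arr.length : Int) then chk (pvG arr i) (pvG arr (i + 2)) (pvG arr (i + 3)) else 0)
      + (if i + 4 < (arr.length : Int) then chk (pvG arr i) (pvG arr (i + 2)) (pvG arr (i + 4)) else 0)
      + (if i + 3 < (arr.length : Int) then chk (pvG arr (i + 1)) (pvG arr (i + 2)) (pvG arr (i + 3)) else 0)
      + (if i + 4 < (arr.length : Int) then chk (pvG arr (i + 1)) (pvG arr (i + 2)) (pvG arr (i + 4)) else 0)
      + (if i + 4 < (arr.length : Int) then chk (pvG arr (i + 1)) (pvG arr (i + 3)) (pvG arr (i + 4)) else 0)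
      + (if i + 5 < (arr.length : Int) then chk (pvG arr (i + 1)) (pvG arr (i + 3)) (pvG arr (i + 5)) else 0) := by
  by_cases hin : i < (arr.length : Int)
  · rw [trojki_count.eq_def, if_neg (by simp), if_neg (by omega),
        dif_pos (pv_inrange h1 hin), if_neg (by simp)]
    simp only [List.nil_append, pvG_fold]
    rw [pv_A0t arr (i + 1) (by omega) (by omega),
        pv_A1f arr (i + 1) (pvG arr i) (by omega) (by omega)]
    simp only [pvn11, pvn12, pvn13, pvn14, pvn21, pvn22, pvn23, pvn31, pvn32, pvn41]
    first | ring1 | (split_ifs <;> first | (exfalso; omega) | ring1)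
  · have hi : i = (arr.length : Int) := by omega
    rw [trojki_count.eq_def, if_neg (by simp), if_pos hi]
    split_ifs <;> first | (exfalso; omega) | ring1

-- ===== VERDICT (by name: the statement is the Claim_ definition above) =====
set_option maxHeartbeats 1000000 in
theorem trojki_count_spec : Claim_equal_trojki_count := by
  intro arr i numbers skip _hdom hpre
  unfold Spec_trojki_count
  rcases numbers with _ | ⟨a, _ | ⟨b, _ | ⟨c, _ | ⟨d, rest⟩⟩⟩⟩
  · -- numbers = []
    rcases hpre with h3 | ⟨h1, h2⟩
    · exact absurd h3 (by simp)
    cases skip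
    · rw [pv_A0f arr i h1 h2]
      simp [trojki_count_alt, List.foldl, pv_pull, pvIdx0, pvIdx1, pvIdx2]
      try simp only [pvG_fold]
      try simp only [pvn11, pvn12, pvn13, pvn14, pvn21, pvn22, pvn23, pvn31, pvn32, pvn41]
      try ring1
      try (split_ifs <;> first | (exfalso; omega) | ring1)
    · rw [pv_A0t arr i h1 h2]
      simp [trojki_count_alt, List.foldl, pv_pull, pvIdx0, pvIdx1, pvIdx2]
      try simp only [pvG_fold]
      try simp only [pvn11, pvn12, pvn13, pvn14, pvn21, pvn22, pvn23, pvn31, pvn32, pvn41]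
      try ring1
      try (split_ifs <;> first | (exfalso; omega) | ring1)
  · -- numbers = [a]
    rcases hpre with h3 | ⟨h1, h2⟩
    · exact absurd h3 (by simp)
    cases skip
    · rw [pv_A1f arr i a h1 h2]
      simp [trojki_count_alt, List.foldl, pv_pull, pvIdx0, pvIdx1, pvIdx2]
      try simp only [pvG_fold]
      try simp only [pvn11, pvn12, pvn13, pvn14, pvn21, pvn22, pvn23, pvn31, pvn32, pvn41]
      try ring1
      try (split_ifs <;> first | (exfalso; omega) | ring1)
    · rw [pv_A1t arr i a h1 h2]
      simp [trojki_count_alt, List.foldl, pv_pull, pvIdx0, pvIdx1, pvIdx2]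
      try simp only [pvG_fold]
      try simp only [pvn11, pvn12, pvn13, pvn14, pvn21, pvn22, pvn23, pvn31, pvn32, pvn41]
      try ring1
      try (split_ifs <;> first | (exfalso; omega) | ring1)
  · -- numbers = [a, b]
    rcases hpre with h3 | ⟨h1, h2⟩
    · exact absurd h3 (by simp)
    cases skip
    · rw [pv_A2f arr i a b h1 h2]
      simp [trojki_count_alt, List.foldl, pv_pull, pvIdx0, pvIdx1, pvIdx2]
      try simp only [pvG_fold]
      try ring1
      try (split_ifs <;> first | (exfalso; omega) | ring1)
    · rw [pv_A2t arr i a b h1 h2]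
      simp [trojki_count_alt, List.foldl, pv_pull, pvIdx0, pvIdx1, pvIdx2]
      try simp only [pvG_fold]
      try ring1
      try (split_ifs <;> first | (exfalso; omega) | ring1)
  · -- numbers = [a, b, c]
    rw [pv_A3]
    simp [trojki_count_alt, pvIdx0, pvIdx1, pvIdx2]
  · -- numbers has length ≥ 4
    rcases hpre with h3 | ⟨h1, h2⟩
    · exact absurd h3 (by simp only [List.length_cons]; omega)
    rw [pv_Abig arr ((arr.length : Int) - i).toNat i _ skip (by simp only [List.length_cons]; omega) h1 h2 rfl]
    simp only [trojki_count_alt]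
    rw [if_neg (by simp only [List.length_cons]; omega), if_pos (by simp only [List.length_cons]; omega)]
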